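-- pv_equiv track=rewrite | github.com/sanette/rename_by_content | rename_by_content.py | max_scores
-- ===== SOURCE A (Python) =====
-- def max_scores(datelist):
--     """Return the list of dates having max score"""
--
--     res = []
--     mscore = 0
--     for (d, score) in datelist:
--         if score > mscore:
--             res = [d]
--             mscore = score
--         elif score == mscore:
--             res.append(d)
--     return (res)
-- ===== SOURCE B (Python) =====
-- def max_scores(datelist):
--     """Return the list of dates having max score"""
--     m = max(0, max((s for _, s in datelist), default=0))
--     return [d for d, s in datelist if s == m]
-- ===== Notes on version B (the rewrite author's own statement) =====
-- stated objective: simpler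
-- what changed: Replaces the streaming reset/append loop carrying (res, mscore) state by a compute-the-winning-score pass (with the 0 floor via max(0, ..., default=0)) followed by a filter, preserving order.
import Mathlib
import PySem

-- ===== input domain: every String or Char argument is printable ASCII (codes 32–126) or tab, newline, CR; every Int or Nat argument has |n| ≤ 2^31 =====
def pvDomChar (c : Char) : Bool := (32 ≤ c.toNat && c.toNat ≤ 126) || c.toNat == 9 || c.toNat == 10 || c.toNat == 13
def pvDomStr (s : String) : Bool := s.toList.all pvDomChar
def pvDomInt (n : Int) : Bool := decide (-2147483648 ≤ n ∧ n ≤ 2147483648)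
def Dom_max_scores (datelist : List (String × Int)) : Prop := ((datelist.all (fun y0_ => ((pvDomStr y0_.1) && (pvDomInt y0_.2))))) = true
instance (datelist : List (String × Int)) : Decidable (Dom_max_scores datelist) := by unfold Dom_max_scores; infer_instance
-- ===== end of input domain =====

-- ===== PORT A =====
def max_scores (datelist : List (String × Int)) : List String :=
  (datelist.foldl (fun (st : List String × Int) p =>
      if p.2 > st.2 then ([p.1], p.2)
      else if p.2 = st.2 then (st.1 ++ [p.1], st.2)
      else st) ([], 0)).1

-- ===== PORT B =====
def max_scores_alt (datelist : List (String × Int)) : List String :=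
  let inner : Int := match datelist.map Prod.snd with
    | [] => 0
    | x :: xs => xs.foldl max x
  let m := max 0 inner
  (datelist.filter (fun p => p.2 == m)).map Prod.fst

-- ===== PRECONDITION & SPEC =====
def Spec_max_scores (datelist : List (String × Int)) (out : List String) : Prop := out = max_scores_alt datelist
instance (datelist : List (String × Int)) (out : List String) : Decidable (Spec_max_scores datelist out) := by unfold Spec_max_scores; infer_instance

-- ===== CLAIM (what is proved, stated in full; the proofs are below) =====
def Claim_equal_max_scores : Prop := ∀ (datelist : List (String × Int)), Dom_max_scores datelist → Spec_max_scores datelist (max_scores datelist)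

-- ===== LEMMAS AND PROOFS =====

-- ===== VERDICT (by name: the statement is the Claim_ definition above) =====
-- dates of l whose score equals v, in order
def pvFilt (l : List (String × Int)) (v : Int) : List String :=
  (l.filter (fun p => p.2 == v)).map Prod.fst

-- running max of the scores of l starting from m
def pvMx (l : List (String × Int)) (m : Int) : Int :=
  l.foldl (fun a p => max a p.2) m

theorem pvMx_ge (l : List (String × Int)) (m : Int) : m ≤ pvMx l m := by
  induction l generalizing m with
  | nil => simp [pvMx]
  | cons p t ih =>
    have := ih (max m p.2)
    simp only [pvMx, List.foldl] at *
    exact le_trans (le_max_left _ _) this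

theorem foldl_max_pull (l : List Int) (a c : Int) :
    max c (l.foldl max a) = l.foldl max (max c a) := by
  induction l generalizing a with
  | nil => simp
  | cons x t ih =>
    simp only [List.foldl]
    rw [ih, max_assoc]

-- invariant of A's loop
theorem loopA_inv (l : List (String × Int)) (res : List String) (m : Int) :
    l.foldl (fun (st : List String × Int) p =>
      if p.2 > st.2 then ([p.1], p.2)
      else if p.2 = st.2 then (st.1 ++ [p.1], st.2)
      else st) (res, m)
    = (if pvMx l m = m then res ++ pvFilt l m else pvFilt l (pvMx l m), pvMx l m) := by
  induction l generalizing res m with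
  | nil => simp [pvMx, pvFilt]
  | cons p t ih =>
    obtain ⟨d, s⟩ := p
    simp only [List.foldl]
    rcases lt_trichotomy m s with h | h | h
    · rw [if_pos (by simpa using h)]
      rw [ih]
      have hmx : pvMx t (max m s) = pvMx (⟨d, s⟩ :: t) m := by
        simp [pvMx, List.foldl]
      have hge : s ≤ pvMx t s := pvMx_ge t s
      have hmax : max m s = s := by omega
      rw [hmax] at hmx
      have hMm : pvMx (⟨d, s⟩ :: t) m ≠ m := by
        rw [← hmx]; omega
      rw [if_neg hMm, hmx]
      by_cases hts : pvMx ((d, s) :: t) m = s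
      · rw [if_pos hts, hts]
        simp [pvFilt]
      · rw [if_neg hts]
        have hne : (s == pvMx ((d, s) :: t) m) = false := by
          simp only [beq_eq_false_iff_ne]
          omega
        simp [pvFilt, List.filter, hne]
    · subst h
      rw [if_neg (by omega), if_pos rfl, ih]
      have hmx : pvMx (⟨d, m⟩ :: t) m = pvMx t (max m m) := by
        simp [pvMx, List.foldl]
      rw [max_self] at hmx
      rw [← hmx]
      by_cases hM : pvMx (⟨d, m⟩ :: t) m = m
      · rw [if_pos hM, if_pos hM, hM]
        simp [pvFilt, List.filter]
      · rw [if_neg hM, if_neg hM]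
        have hne : (m == pvMx (⟨d, m⟩ :: t) m) = false := by
          simp only [beq_eq_false_iff_ne]; omega
        simp [pvFilt, List.filter, hne]
    · rw [if_neg (by omega), if_neg (by omega), ih]
      have hmx : pvMx (⟨d, s⟩ :: t) m = pvMx t (max m s) := by
        simp [pvMx, List.foldl]
      have hmax : max m s = m := by omega
      rw [hmax] at hmx
      rw [← hmx]
      have hge : m ≤ pvMx (⟨d, s⟩ :: t) m := by rw [hmx]; exact pvMx_ge t m
      by_cases hM : pvMx (⟨d, s⟩ :: t) m = m
      · rw [if_pos hM, if_pos hM, hM]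
        have hne : (s == m) = false := by simp only [beq_eq_false_iff_ne]; omega
        simp [pvFilt, List.filter, hne]
      · rw [if_neg hM, if_neg hM]
        have hne : (s == pvMx (⟨d, s⟩ :: t) m) = false := by
          simp only [beq_eq_false_iff_ne]; omega
        simp [pvFilt, List.filter, hne]

-- B's winning score equals the running max started at 0, so B computes pvFilt l (pvMx l 0)
theorem alt_eq (l : List (String × Int)) : max_scores_alt l = pvFilt l (pvMx l 0) := by
  cases l with
  | nil => simp [max_scores_alt, pvFilt, pvMx]
  | cons p t =>
    show List.map Prod.fst
        (List.filter (fun q => q.2 == max 0 ((t.map Prod.snd).foldl max p.2)) (p :: t)) = _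
    rw [foldl_max_pull]
    have h : (t.map Prod.snd).foldl max (max 0 p.2) = pvMx (p :: t) 0 := by
      simp [pvMx, List.foldl_map, List.foldl]
    rw [h]
    rfl

theorem max_scores_spec : Claim_equal_max_scores := by
  intro l _
  unfold Spec_max_scores max_scores
  rw [alt_eq, loopA_inv]
  by_cases h : pvMx l 0 = 0
  · rw [if_pos h, h]
    simp
  · rw [if_neg h]
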